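-- pv_equiv track=rewrite | github.com/AlexDobrushskiy/botfarm | botfarm/project_setup.py | remove_project_entry_text
-- ===== SOURCE A (Python) =====
-- def remove_project_entry_text(raw: str, name: str) -> str:
--     """Remove a single project list entry by name from config text.
--
--     Preserves all comments and formatting outside the removed entry.
--     Returns the raw text unchanged if the entry is not found.
--     """
--     lines = raw.split("\n")
--     entry_start = None
--     entry_end = None
--
--     for i, line in enumerate(lines):
--         stripped = line.strip()
--         if not stripped.startswith("- name:"):
--             continue
--         name_part = stripped.split(":", 1)[1]
--         # Strip inline YAML comment
--         if " #" in name_part: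
--             name_part = name_part.split(" #")[0]
--         entry_name = name_part.strip().strip('"').strip("'")
--
--         if entry_name != name:
--             continue
--
--         entry_start = i
--         # Scan forward to find the end of this entry
--         for j in range(i + 1, len(lines)):
--             jstripped = lines[j].strip()
--             # Next list item
--             if jstripped.startswith("- "):
--                 entry_end = j
--                 break
--             # Left the indented section (non-empty, non-indented line)
--             if jstripped and lines[j] and not lines[j][0].isspace():
--                 entry_end = j
--                 break
--         if entry_end is None:
--             entry_end = len(lines)
--         break
--
--     if entry_start is None:
--         return raw
--
--     new_lines = lines[:entry_start] + lines[entry_end:]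
--     return "\n".join(new_lines)
-- ===== SOURCE B (Python) =====
-- def _is_boundary(line):
--     return line.strip().startswith("- ") or (line != "" and not line[0].isspace())
--
--
-- def _entry_name(line):
--     stripped = line.strip()
--     if not stripped.startswith("- name:"):
--         return None
--     part = stripped.split(":", 1)[1]
--     if " #" in part:
--         part = part.split(" #")[0]
--     return part.strip().strip('"').strip("'")
--
--
-- def _group(lines):
--     """Split lines into a preamble and blocks; every boundary line opens a block."""
--     pre, blocks = [], []
--     for line in lines:
--         if _is_boundary(line):
--             blocks.append([line])
--         elif blocks:
--             blocks[-1].append(line)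
--         else:
--             pre.append(line)
--     return pre, blocks
--
--
-- def _drop_entry(name, blocks):
--     """Keep all blocks except the first whose header names `name`; None if absent."""
--     kept = []
--     for k, b in enumerate(blocks):
--         if _entry_name(b[0]) == name:
--             return [line for bb in kept + blocks[k + 1:] for line in bb]
--         kept.append(b)
--     return None
--
--
-- def remove_project_entry_text(raw: str, name: str) -> str:
--     lines = raw.split("\n")
--     pre, blocks = _group(lines)
--     out = _drop_entry(name, blocks)
--     if out is None:
--         return raw
--     return "\n".join(pre + out)
-- ===== Notes on version B (the rewrite author's own statement) =====
-- stated objective: alternative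
-- what changed: A scans lines by index for the matching '- name:' line and then runs an inner index scan for the entry's end; B instead groups the lines once into a preamble plus boundary-headed blocks and removes the first block whose header names the entry, so no index arithmetic or inner scan remains.
import Mathlib
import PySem

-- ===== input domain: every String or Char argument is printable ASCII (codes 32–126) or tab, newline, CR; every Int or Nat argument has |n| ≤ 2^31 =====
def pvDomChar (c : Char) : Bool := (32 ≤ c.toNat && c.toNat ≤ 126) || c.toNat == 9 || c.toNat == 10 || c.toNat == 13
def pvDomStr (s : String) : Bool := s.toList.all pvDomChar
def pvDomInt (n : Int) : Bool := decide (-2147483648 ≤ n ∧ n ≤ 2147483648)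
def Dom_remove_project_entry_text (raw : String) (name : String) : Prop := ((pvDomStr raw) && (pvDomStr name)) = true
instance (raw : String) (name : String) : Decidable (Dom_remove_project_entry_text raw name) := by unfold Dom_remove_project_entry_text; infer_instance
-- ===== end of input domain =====

-- B regroups the config lines once into preamble + boundary-headed blocks and drops the
-- first block whose header names the entry, instead of A's indexed scan + inner end scan.

-- ===== PORT A =====

-- '- name:' line test and name extraction of A's outer loop body
def pvAIsMatch (name : String) (line : String) : Bool :=
  let stripped := PySem.Str.strip line
  if !(PySem.Str.startswith stripped "- name:") then false
  else
    let name_part := PySem.List.pyGetD ((PySem.Str.splitMax? stripped ":" 1).getD []) 1 ""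
    let name_part :=
      if PySem.Str.isIn " #" name_part then
        PySem.List.pyGetD ((PySem.Str.split? name_part " #").getD []) 0 ""
      else name_part
    let entry_name := PySem.Str.stripChars (PySem.Str.stripChars (PySem.Str.strip name_part) "\"") "'"
    entry_name == name

-- A's inner loop: 'for j in range(i+1, len(lines))' looking for the entry's end
def pvAFindEnd (lines : List String) (j : Nat) : Nat :=
  if h : j < lines.length then
    let lj := lines[j]
    let jstripped := PySem.Str.strip lj
    if PySem.Str.startswith jstripped "- " then j
    else if jstripped != "" && lj != "" && !(PySem.Chars.isspace (PySem.List.pyGetD lj.toList 0 ' ')) then j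
    else pvAFindEnd lines (j + 1)
  else lines.length   -- entry_end is None: entry_end = len(lines)
termination_by lines.length - j

-- A's outer loop over enumerate(lines); returns (entry_start, entry_end)
def pvAFindStart (name : String) (lines : List String) (rest : List String) (i : Nat) :
    Option (Nat × Nat) :=
  match rest with
  | [] => none
  | line :: tl =>
    if pvAIsMatch name line then some (i, pvAFindEnd lines (i + 1))
    else pvAFindStart name lines tl (i + 1)

def remove_project_entry_text (raw : String) (name : String) : String :=
  let lines := (PySem.Str.split? raw "\n").getD []
  match pvAFindStart name lines lines 0 with
  | none => raw
  | some (s, e) =>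
      PySem.Str.join "\n"
        (PySem.List.slice lines none (some (s : Int)) ++ PySem.List.slice lines (some (e : Int)) none)

-- ===== PORT B =====

def pvBIsBoundary (line : String) : Bool :=
  PySem.Str.startswith (PySem.Str.strip line) "- " ||
    (line != "" && !(PySem.Chars.isspace (PySem.List.pyGetD line.toList 0 ' ')))

def pvBEntryName (line : String) : Option String :=
  let stripped := PySem.Str.strip line
  if PySem.Str.startswith stripped "- name:" then
    let part := PySem.List.pyGetD ((PySem.Str.splitMax? stripped ":" 1).getD []) 1 ""
    let part :=
      if PySem.Str.isIn " #" part then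
        PySem.List.pyGetD ((PySem.Str.split? part " #").getD []) 0 ""
      else part
    some (PySem.Str.stripChars (PySem.Str.stripChars (PySem.Str.strip part) "\"") "'")
  else none

-- Source B's _group loop: boundary opens a block, otherwise extend the last block (or the preamble)
def pvBGroup (lines : List String) : List String × List (List String) :=
  lines.foldl
    (fun st line =>
      if pvBIsBoundary line then (st.1, st.2 ++ [[line]])
      else if st.2 ≠ [] then (st.1, st.2.dropLast ++ [st.2.getLastD [] ++ [line]])
      else (st.1 ++ [line], st.2))
    ([], [])

-- Source B's _drop_entry loop with its `kept` accumulator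
def pvBDropEntry (name : String) (kept : List (List String)) :
    List (List String) → Option (List String)
  | [] => none
  | b :: bs =>
    if pvBEntryName (b.headD "") == some name then some ((kept ++ bs).flatten)
    else pvBDropEntry name (kept ++ [b]) bs

def remove_project_entry_text_alt (raw : String) (name : String) : String :=
  let lines := (PySem.Str.split? raw "\n").getD []
  let pb := pvBGroup lines
  match pvBDropEntry name [] pb.2 with
  | none => raw
  | some out => PySem.Str.join "\n" (pb.1 ++ out)

-- ===== PRECONDITION & SPEC =====
def Spec_remove_project_entry_text (raw : String) (name : String) (out : String) : Prop := out = remove_project_entry_text_alt raw name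
instance (raw : String) (name : String) (out : String) : Decidable (Spec_remove_project_entry_text raw name out) := by unfold Spec_remove_project_entry_text; infer_instance

-- ===== CLAIM (what is proved, stated in full; the proofs are below) =====
def Claim_equal_remove_project_entry_text : Prop := ∀ (raw : String) (name : String), Dom_remove_project_entry_text raw name → Spec_remove_project_entry_text raw name (remove_project_entry_text raw name)

-- ===== LEMMAS AND PROOFS =====

-- reference scan both ports are reduced to
def pvRef (name : String) : List String → Option (List String)
  | [] => none
  | l :: ls =>
    if pvBEntryName l == some name then some (ls.dropWhile (fun x => !pvBIsBoundary x))
    else (pvRef name ls).map (l :: ·)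

-- the two '- name:' tests agree
theorem pvMatch_eq (name line : String) :
    pvAIsMatch name line = (pvBEntryName line == some name) := by
  unfold pvAIsMatch pvBEntryName
  by_cases h : PySem.Str.startswith (PySem.Str.strip line) "- name:" = true <;>
    (simp at h; simp [h])

-- a nonempty line whose first character is not whitespace strips to a nonempty string
theorem pvStrip_ne_empty (l : String) (h0 : l ≠ "")
    (h1 : PySem.Chars.isspace (PySem.List.pyGetD l.toList 0 ' ') = false) :
    PySem.Str.strip l ≠ "" := by
  intro hcon
  have htl : (PySem.Str.strip l).toList = [] := by rw [hcon]; rfl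
  rw [PySem.Str.toList_strip] at htl
  have hl : l.toList ≠ [] := fun he => h0 (by
    have := congrArg String.ofList he
    simpa using this)
  obtain ⟨c, t, hct⟩ := List.exists_cons_of_ne_nil hl
  rw [hct] at htl h1
  simp [PySem.List.pyGetD] at h1
  simp [PySem.Chars.strip, PySem.Chars.lstrip, PySem.Chars.rstrip, h1] at htl
  exact absurd (htl c (Or.inr rfl)) (by simp [h1])

-- A's two inner-loop break tests combined are exactly pvBIsBoundary
theorem pvBoundA_eq (lj : String) :
    (PySem.Str.startswith (PySem.Str.strip lj) "- " ||
      ((PySem.Str.strip lj != "") && (lj != "") &&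
        !(PySem.Chars.isspace (PySem.List.pyGetD lj.toList 0 ' ')))) = pvBIsBoundary lj := by
  unfold pvBIsBoundary
  by_cases hs : PySem.Str.startswith (PySem.Str.strip lj) "- " = true
  · simp at hs; simp [hs]
  · simp at hs
    by_cases h0 : lj = ""
    · simp [h0]
    · by_cases h1 : PySem.Chars.isspace (PySem.List.pyGetD lj.toList 0 ' ') = true
      · simp [hs, h1]
      · have h2 := pvStrip_ne_empty lj h0 (by simpa using h1)
        simp [hs, h0, h1] at h2 ⊢
        simpa using h2

-- a '- name:' line is a boundary
theorem pvMatch_boundary (name l : String) (h : (pvBEntryName l == some name) = true) :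
    pvBIsBoundary l = true := by
  have hsw : PySem.Str.startswith (PySem.Str.strip l) "- name:" = true := by
    by_contra hc
    simp only [Bool.not_eq_true] at hc
    simp only [pvBEntryName, hc] at h
    simp at h
  unfold pvBIsBoundary
  have hp : PySem.Str.startswith (PySem.Str.strip l) "- " = true := by
    rw [PySem.Str.startswith_eq, PySem.Chars.startswith_iff] at hsw ⊢
    exact List.IsPrefix.trans (by decide) hsw
  simp at hp
  simp [hp]

theorem pvDrop_takeWhile_len {α : Type} (p : α → Bool) (xs : List α) :
    xs.drop (xs.takeWhile p).length = xs.dropWhile p := by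
  induction xs with
  | nil => simp
  | cons x xs ih => by_cases h : p x <;> simp [h, ih]

-- characterize A's inner scan
theorem pvAFindEnd_char_aux (lines : List String) (n : Nat) :
    ∀ j, lines.length - j = n → j ≤ lines.length →
    pvAFindEnd lines j = j + ((lines.drop j).takeWhile (fun l => !pvBIsBoundary l)).length := by
  induction n with
  | zero =>
    intro j h1 h2
    have hj : j = lines.length := by omega
    subst hj
    rw [pvAFindEnd, dif_neg (by omega)]
    simp
  | succ n ih =>
    intro j h1 h2
    have hlt : j < lines.length := by omega
    rw [pvAFindEnd, dif_pos hlt]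
    have hd : lines.drop j = lines[j] :: lines.drop (j + 1) := List.drop_eq_getElem_cons hlt
    by_cases hc1 : PySem.Str.startswith (PySem.Str.strip lines[j]) "- " = true
    · have hb : pvBIsBoundary lines[j] = true := by
        rw [← pvBoundA_eq]; simp only [Bool.or_eq_true]; left; exact hc1
      rw [hd, List.takeWhile_cons]
      simp only [hc1, if_true, hb, Bool.not_true, Bool.false_eq_true, if_false,
        List.length_nil, Nat.add_zero]
    · by_cases hc2 : (PySem.Str.strip lines[j] != "" && lines[j] != "" &&
          !(PySem.Chars.isspace (PySem.List.pyGetD lines[j].toList 0 ' '))) = true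
      · have hb : pvBIsBoundary lines[j] = true := by
          rw [← pvBoundA_eq]; simp only [Bool.or_eq_true]; right; exact hc2
        rw [hd, List.takeWhile_cons]
        simp only [eq_false_of_ne_true hc1, hc2, if_true, Bool.false_eq_true, if_false, hb,
          Bool.not_true, List.length_nil, Nat.add_zero]
      · have hb : pvBIsBoundary lines[j] = false := by
          rw [← pvBoundA_eq]
          simp only [Bool.or_eq_false_iff]
          exact ⟨eq_false_of_ne_true hc1, eq_false_of_ne_true hc2⟩
        rw [ih (j + 1) (by omega) (by omega)]
        rw [hd, List.takeWhile_cons]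
        simp only [eq_false_of_ne_true hc1, hc2, Bool.false_eq_true, if_false, hb,
          Bool.not_false, if_true, List.length_cons]
        omega

theorem pvAFindEnd_char (lines : List String) (j : Nat) (hj : j ≤ lines.length) :
    pvAFindEnd lines j = j + ((lines.drop j).takeWhile (fun l => !pvBIsBoundary l)).length :=
  pvAFindEnd_char_aux lines (lines.length - j) j rfl hj

-- characterize A's outer scan against pvRef
theorem pvAFindStart_char (name : String) (lines : List String) (i : Nat)
    (rest : List String) (hrest : rest = lines.drop i) :
    (match pvAFindStart name lines rest i with
      | none => (none : Option (List String))
      | some (s, e) => some (lines.take s ++ lines.drop e))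
    = (pvRef name rest).map (fun out => lines.take i ++ out) := by
  induction rest generalizing i with
  | nil => simp [pvAFindStart, pvRef]
  | cons line tl ih =>
    have hi : i < lines.length := by
      by_contra hc
      rw [List.drop_eq_nil_of_le (by omega)] at hrest
      exact absurd hrest (by simp)
    have hcons : line :: tl = lines[i] :: lines.drop (i + 1) := by
      rw [hrest]; exact List.drop_eq_getElem_cons hi
    injection hcons with hhead htail
    subst htail
    unfold pvAFindStart pvRef
    rw [pvMatch_eq]
    by_cases hm : (pvBEntryName line == some name) = true
    · rw [hm]
      simp only [if_true]
      rw [pvAFindEnd_char lines (i + 1) (by omega)]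
      have hdw : lines.drop
            (i + 1 + ((lines.drop (i + 1)).takeWhile (fun l => !pvBIsBoundary l)).length)
          = (lines.drop (i + 1)).dropWhile (fun l => !pvBIsBoundary l) := by
        rw [← pvDrop_takeWhile_len (fun l => !pvBIsBoundary l) (lines.drop (i + 1))]
        rw [List.drop_drop]
      rw [hdw]
      rfl
    · simp only [eq_false_of_ne_true hm, Bool.false_eq_true, if_false]
      rw [ih (i + 1) rfl]
      have htake : lines.take (i + 1) = lines.take i ++ [line] := by
        rw [List.take_add_one]
        simp [List.getElem?_eq_getElem hi, ← hhead]
      cases pvRef name (lines.drop (i + 1)) <;> simp [htake]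

-- pvRef over a prefix with no matching line
theorem pvRef_prefix (name : String) (p xs : List String)
    (hp : ∀ l ∈ p, (pvBEntryName l == some name) = false) :
    pvRef name (p ++ xs) = (pvRef name xs).map (p ++ ·) := by
  induction p with
  | nil => simp
  | cons l p ih =>
    have hl := hp l (by simp)
    simp only [List.cons_append, pvRef, hl, Bool.false_eq_true, if_false,
      ih (fun x hx => hp x (by simp [hx])), Option.map_map]
    rfl

-- block well-formedness produced by _group
def pvWF (b : List String) : Prop :=
  b ≠ [] ∧ pvBIsBoundary (b.headD "") = true ∧ ∀ l ∈ b.tail, pvBIsBoundary l = false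

theorem pvBGroup_inv (lines : List String) :
    (pvBGroup lines).1 ++ (pvBGroup lines).2.flatten = lines ∧
    (∀ l ∈ (pvBGroup lines).1, pvBIsBoundary l = false) ∧
    (∀ b ∈ (pvBGroup lines).2, pvWF b) := by
  induction lines using List.reverseRecOn with
  | nil =>
    have h : pvBGroup [] = ([], []) := rfl
    rw [h]
    exact ⟨rfl, by simp, by simp⟩
  | append_singleton xs x ih =>
    obtain ⟨h1, h2, h3⟩ := ih
    have hstep : pvBGroup (xs ++ [x]) =
        (if pvBIsBoundary x then ((pvBGroup xs).1, (pvBGroup xs).2 ++ [[x]])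
         else if (pvBGroup xs).2 ≠ [] then
           ((pvBGroup xs).1, (pvBGroup xs).2.dropLast ++ [(pvBGroup xs).2.getLastD [] ++ [x]])
         else ((pvBGroup xs).1 ++ [x], (pvBGroup xs).2)) := by
      unfold pvBGroup
      rw [List.foldl_append]
      rfl
    by_cases hb : pvBIsBoundary x = true
    · rw [hstep, if_pos hb]
      refine ⟨?_, h2, ?_⟩
      · simp only [List.flatten_append, List.flatten_cons, List.flatten_nil, List.append_nil,
          ← List.append_assoc, h1]
      · intro b hbmem
        rcases List.mem_append.mp hbmem with hmem | hmem
        · exact h3 b hmem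
        · simp only [List.mem_singleton] at hmem
          subst hmem
          exact ⟨by simp, by simpa using hb, by simp⟩
    · by_cases hne : (pvBGroup xs).2 = []
      · rw [hstep, if_neg (by simp [hb]), if_neg (by simp [hne])]
        refine ⟨?_, ?_, ?_⟩
        · rw [hne] at h1 ⊢
          simp only [List.flatten_nil, List.append_nil] at h1 ⊢
          rw [h1]
        · intro l hl
          rcases List.mem_append.mp hl with hmem | hmem
          · exact h2 l hmem
          · simp only [List.mem_singleton] at hmem
            subst hmem
            simpa using hb
        · rw [hne]; simp
      · rw [hstep, if_neg (by simp [hb]), if_pos hne]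
        obtain ⟨init, last, hL⟩ : ∃ L b, (pvBGroup xs).2 = L ++ [b] := by
          rcases List.eq_nil_or_concat (pvBGroup xs).2 with h' | ⟨L, b, h'⟩
          · exact absurd h' hne
          · exact ⟨L, b, by simpa using h'⟩
        rw [hL] at h1 h3 ⊢
        rw [List.dropLast_concat, List.getLastD_concat]
        have hwfl : pvWF last := h3 last (by simp)
        obtain ⟨hne', hhd, htl⟩ := hwfl
        obtain ⟨a, t, hat⟩ := List.exists_cons_of_ne_nil hne'
        refine ⟨?_, h2, ?_⟩
        · simp only [List.flatten_append, List.flatten_cons, List.flatten_nil, List.append_nil,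
            ← List.append_assoc] at h1 ⊢
          rw [h1]
        · intro b hbmem
          rcases List.mem_append.mp hbmem with hmem | hmem
          · exact h3 b (List.mem_append.mpr (Or.inl hmem))
          · simp only [List.mem_singleton] at hmem
            subst hmem
            rw [hat] at hhd htl ⊢
            refine ⟨by simp, by simpa using hhd, ?_⟩
            intro l hl
            simp only [List.cons_append, List.tail_cons, List.mem_append,
              List.mem_singleton] at hl
            rcases hl with hl | hl
            · exact htl l (by simpa using hl)
            · subst hl; simpa using hb

theorem pvDropEntry_char (name : String) (bs : List (List String)) (kept : List (List String))
    (hwf : ∀ b ∈ bs, pvWF b) :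
    pvBDropEntry name kept bs = (pvRef name bs.flatten).map (kept.flatten ++ ·) := by
  induction bs generalizing kept with
  | nil => simp [pvBDropEntry, pvRef]
  | cons b bs ih =>
    obtain ⟨hne, hhd, htl⟩ := hwf b (by simp)
    obtain ⟨h, t, hht⟩ := List.exists_cons_of_ne_nil hne
    subst hht
    simp only [List.headD_cons] at hhd htl ⊢
    have hwf' : ∀ b ∈ bs, pvWF b := fun b hb => hwf b (by simp [hb])
    unfold pvBDropEntry
    simp only [List.headD_cons]
    by_cases hm : (pvBEntryName h == some name) = true
    · rw [if_pos hm]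
      have hflat : ((h :: t) :: bs).flatten = h :: (t ++ bs.flatten) := by simp
      rw [hflat]
      unfold pvRef
      rw [if_pos hm]
      have hdwt : (t ++ bs.flatten).dropWhile (fun x => !pvBIsBoundary x) = bs.flatten := by
        rw [List.dropWhile_append]
        have ht0 : t.dropWhile (fun x => !pvBIsBoundary x) = [] := by
          rw [List.dropWhile_eq_nil_iff]
          intro x hx
          simp [htl x (by simpa using hx)]
        rw [ht0]
        simp only [List.isEmpty_nil, if_true]
        cases hbs : bs.flatten with
        | nil => rfl
        | cons y ys =>
          have : pvBIsBoundary y = true := by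
            cases bs with
            | nil => simp at hbs
            | cons b' bs' =>
              obtain ⟨hne', hhd', _⟩ := hwf' b' (by simp)
              obtain ⟨a, t', hat⟩ := List.exists_cons_of_ne_nil hne'
              rw [hat] at hhd'
              simp at hhd'
              have : y = a := by
                rw [hat] at hbs
                simp at hbs
                exact hbs.1.symm
              rw [this]; exact hhd'
          rw [List.dropWhile_cons]
          simp [this]
      rw [hdwt]
      simp
    · rw [if_neg hm]
      rw [ih (kept ++ [h :: t]) hwf']
      have hpre : pvRef name (((h :: t) :: bs).flatten)
          = (pvRef name bs.flatten).map ((h :: t) ++ ·) := by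
        have : ((h :: t) :: bs).flatten = (h :: t) ++ bs.flatten := by simp
        rw [this]
        apply pvRef_prefix
        intro l hl
        rcases List.mem_cons.mp hl with hl | hl
        · subst hl; exact eq_false_of_ne_true hm
        · by_contra hc
          simp only [Bool.not_eq_false] at hc
          have := pvMatch_boundary name l hc
          rw [htl l hl] at this
          simp at this
      rw [hpre]
      cases pvRef name bs.flatten <;> simp

theorem pvMain (name raw : String) (lines : List String) :
    (match pvAFindStart name lines lines 0 with
      | none => raw
      | some (s, e) =>
          PySem.Str.join "\n"
            (PySem.List.slice lines none (some (s : Int)) ++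
              PySem.List.slice lines (some (e : Int)) none))
    = (match pvBDropEntry name [] (pvBGroup lines).2 with
      | none => raw
      | some out => PySem.Str.join "\n" ((pvBGroup lines).1 ++ out)) := by
  obtain ⟨hflat, hpre, hwf⟩ := pvBGroup_inv lines
  have hdrop := pvDropEntry_char name (pvBGroup lines).2 [] hwf
  simp only [List.flatten_nil, List.nil_append, Option.map_id'] at hdrop
  have hrefl : pvRef name lines
      = (pvRef name (pvBGroup lines).2.flatten).map ((pvBGroup lines).1 ++ ·) := by
    conv_lhs => rw [← hflat]
    exact pvRef_prefix name _ _ (fun l hl => by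
      by_contra hc
      simp only [Bool.not_eq_false] at hc
      have hbb := pvMatch_boundary name l hc
      rw [hpre l hl] at hbb
      exact absurd hbb (by simp))
  have hA := pvAFindStart_char name lines 0 lines (by simp)
  simp only [List.take_zero, List.nil_append] at hA
  cases hscan : pvAFindStart name lines lines 0 with
  | none =>
    rw [hscan] at hA
    simp only [] at hA
    have hrn : pvRef name lines = none := by
      cases hv : pvRef name lines
      · rfl
      · rw [hv] at hA; simp at hA
    rw [hrn] at hrefl
    have hfn : pvRef name (pvBGroup lines).2.flatten = none := by
      cases hv : pvRef name (pvBGroup lines).2.flatten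
      · rfl
      · rw [hv] at hrefl; simp at hrefl
    rw [hfn] at hdrop
    rw [hdrop]
  | some se =>
    obtain ⟨s, e⟩ := se
    rw [hscan] at hA
    obtain ⟨r, hr⟩ : ∃ r, pvRef name lines = some r := by
      cases hv : pvRef name lines
      · rw [hv] at hA; simp at hA
      · exact ⟨_, rfl⟩
    rw [hr] at hA hrefl
    obtain ⟨rf, hrf, hrfe⟩ : ∃ rf, pvRef name (pvBGroup lines).2.flatten = some rf ∧
        r = (pvBGroup lines).1 ++ rf := by
      cases hv : pvRef name (pvBGroup lines).2.flatten with
      | none => rw [hv] at hrefl; simp at hrefl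
      | some v => rw [hv] at hrefl; simp at hrefl; exact ⟨v, rfl, hrefl⟩
    rw [hrf] at hdrop
    rw [hdrop]
    simp only []
    rw [PySem.List.slice_to_natCast, PySem.List.slice_from_natCast]
    have hAv : List.take s lines ++ List.drop e lines = r := by simpa using hA
    rw [hAv, hrfe]

-- ===== VERDICT (by name: the statement is the Claim_ definition above) =====
theorem remove_project_entry_text_spec : Claim_equal_remove_project_entry_text := by
  intro raw name _
  show remove_project_entry_text raw name = remove_project_entry_text_alt raw name
  unfold remove_project_entry_text remove_project_entry_text_alt
  exact pvMain name raw ((PySem.Str.split? raw "\n").getD [])
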